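-- pv_equiv track=rewrite | github.com/vietahnn/research | siformer/utils.py | get_sequence_list
-- ===== SOURCE A (Python) =====
-- def get_sequence_list(num):
--     if num == 0:
--         return [0]
--
--     result, i = [1], 2
--     while sum(result) != num:
--         if sum(result) + i > num:
--             for j in range(i - 1, 0, -1):
--                 if sum(result) + j <= num:
--                     result.append(j)
--         else:
--             result.append(i)
--         i += 1
--
--     return sorted(result, reverse=True)
-- ===== SOURCE B (Python) =====
-- def get_sequence_list(num):
--     if num == 0:
--         return [0]
--     total, k = 0, 0
--     while total + k + 1 <= num:
--         k += 1
--         total += k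
--     r = num - total
--     if r == 0:
--         return list(range(k, 0, -1))
--     return list(range(k, r, -1)) + [r] + list(range(r, 0, -1))
-- ===== Notes on version B (the rewrite author's own statement) =====
-- stated objective: faster
-- what changed: Replaces A's list-growing loop that recomputes sum(result) on every test and a final sort with a single O(sqrt(n)) accumulator loop finding the largest k with k(k+1)/2 <= num, then constructs the descending output directly from ranges without sorting.
import Mathlib
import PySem

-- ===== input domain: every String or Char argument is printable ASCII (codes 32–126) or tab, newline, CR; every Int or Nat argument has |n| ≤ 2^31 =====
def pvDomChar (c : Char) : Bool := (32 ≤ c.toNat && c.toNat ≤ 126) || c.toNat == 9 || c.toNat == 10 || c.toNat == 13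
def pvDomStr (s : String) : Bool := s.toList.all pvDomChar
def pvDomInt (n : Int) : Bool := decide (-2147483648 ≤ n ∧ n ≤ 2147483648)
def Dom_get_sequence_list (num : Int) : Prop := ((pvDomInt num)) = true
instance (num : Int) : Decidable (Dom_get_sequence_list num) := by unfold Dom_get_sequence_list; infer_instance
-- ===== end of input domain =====

-- B replaces A's quadratic-ish sum-recomputing loop and final sort by an O(√num)
-- accumulator loop for the largest k with k(k+1)/2 ≤ num and a direct descending
-- construction of the output (no sort).

-- ===== PORT A =====
-- sum(result)
def pySum (l : List Int) : Int := l.foldl (· + ·) 0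

-- the inner 'for j in range(i-1, 0, -1): if sum(result)+j <= num: result.append(j)'
def innerA (num : Int) (res : List Int) (i : Int) : List Int :=
  (PySem.List.pyRange (i - 1) 0 (-1)).foldl
    (fun acc j => if pySum acc + j ≤ num then acc ++ [j] else acc) res

-- the outer 'while sum(result) != num' loop; fuel only makes the same computation total
def loopA (num : Int) (fuel : Nat) (res : List Int) (i : Int) : List Int :=
  match fuel with
  | 0 => res
  | f + 1 =>
    if pySum res ≠ num then
      if pySum res + i > num then loopA num f (innerA num res i) (i + 1)
      else loopA num f (res ++ [i]) (i + 1)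
    else res

def get_sequence_list (num : Int) : List Int :=
  if num = 0 then [0]
  else PySem.List.sorted (loopA num (num.toNat + 2) [1] 2) (fun x => x) true

-- ===== PORT B =====
-- 'while total + k + 1 <= num: k += 1; total += k'; fuel only makes it total
def loopB (num : Int) (fuel : Nat) (total k : Int) : Int × Int :=
  match fuel with
  | 0 => (total, k)
  | f + 1 =>
    if total + k + 1 ≤ num then loopB num f (total + (k + 1)) (k + 1)
    else (total, k)

def get_sequence_list_alt (num : Int) : List Int :=
  if num = 0 then [0]
  else
    let p := loopB num (num.toNat + 1) 0 0
    let r := num - p.1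
    if r = 0 then PySem.List.pyRange p.2 0 (-1)
    else PySem.List.pyRange p.2 r (-1) ++ r :: PySem.List.pyRange r 0 (-1)

-- ===== PRECONDITION & SPEC =====
-- Pre_ excludes num < 0, on which A's while-loop never terminates (A returns no value there).
def Pre_get_sequence_list (num : Int) : Prop := 0 ≤ num
instance (num : Int) : Decidable (Pre_get_sequence_list num) := by
  unfold Pre_get_sequence_list; infer_instance

def pvWitness_get_sequence_list : Int := (7)

def Spec_get_sequence_list (num : Int) (out : List Int) : Prop := out = get_sequence_list_alt num
instance (num : Int) (out : List Int) : Decidable (Spec_get_sequence_list num out) := by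
  unfold Spec_get_sequence_list; infer_instance

-- ===== CLAIM (what is proved, stated in full; the proofs are below) =====
def Claim_equal_get_sequence_list : Prop :=
  ∀ (num : Int), Dom_get_sequence_list num → Pre_get_sequence_list num →
    Spec_get_sequence_list num (get_sequence_list num)

-- ===== LEMMAS AND PROOFS =====

theorem pySum_append (l : List Int) (x : Int) : pySum (l ++ [x]) = pySum l + x := by
  simp [pySum, List.foldl_append]

theorem pySum_pyRange (n : Nat) :
    2 * pySum (PySem.List.pyRange 1 (1 + (n : Int)) 1) = (n : Int) * ((n : Int) + 1) := by
  induction n with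
  | zero => simp [PySem.List.pyRange_one_eq_nil, pySum]
  | succ m ih =>
    have h : PySem.List.pyRange 1 (1 + (m : Int) + 1) 1
        = PySem.List.pyRange 1 (1 + (m : Int)) 1 ++ [1 + (m : Int)] :=
      PySem.List.pyRange_one_succ_right (by omega)
    push_cast
    push_cast at ih
    rw [show (1 : Int) + ((m : Int) + 1) = 1 + (m : Int) + 1 by ring, h, pySum_append]
    ring_nf
    ring_nf at ih
    omega

theorem pySum_pyRange' (i : Int) (hi : 1 ≤ i) :
    2 * pySum (PySem.List.pyRange 1 i 1) = (i - 1) * i := by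
  obtain ⟨n, hn⟩ : ∃ n : Nat, i = 1 + (n : Int) := ⟨(i - 1).toNat, by omega⟩
  subst hn
  rw [pySum_pyRange]; ring

-- once the running sum equals num, the inner loop appends nothing
theorem inner_none (num : Int) (mn : Nat) :
    ∀ res : List Int, pySum res = num →
      (PySem.List.pyRange (mn : Int) 0 (-1)).foldl
        (fun acc j => if pySum acc + j ≤ num then acc ++ [j] else acc) res = res := by
  induction mn with
  | zero => intro res _; simp [PySem.List.pyRange_neg_one_eq_nil]
  | succ m ih =>
    intro res hs
    rw [PySem.List.pyRange_neg_one_cons (by omega)]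
    simp only [List.foldl_cons]
    push_cast
    rw [if_neg (by omega), show ((m : Int) + 1 - 1) = (m : Int) by ring, ih res hs]

-- the inner loop appends exactly num - sum(res) when 1 ≤ num - sum(res) ≤ m
theorem inner_hit (num : Int) (mn : Nat) :
    ∀ res : List Int, 1 ≤ num - pySum res → num - pySum res ≤ (mn : Int) →
      (PySem.List.pyRange (mn : Int) 0 (-1)).foldl
        (fun acc j => if pySum acc + j ≤ num then acc ++ [j] else acc) res
        = res ++ [num - pySum res] := by
  induction mn with
  | zero => intro res h1 h2; omega
  | succ m ih =>
    intro res h1 h2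
    rw [PySem.List.pyRange_neg_one_cons (by omega)]
    simp only [List.foldl_cons]
    push_cast
    by_cases hc : pySum res + ((m : Int) + 1) ≤ num
    · -- m+1 = num - pySum res : append it, then nothing more
      have hm : num - pySum res = (m : Int) + 1 := by omega
      rw [if_pos hc]
      have hs : pySum (res ++ [(m : Int) + 1]) = num := by rw [pySum_append]; omega
      rw [show ((m : Int) + 1 - 1) = (m : Int) by ring]
      rw [inner_none num m _ hs, hm]
    · rw [if_neg hc, show ((m : Int) + 1 - 1) = (m : Int) by ring]
      exact ih res h1 (by omega)

theorem innerA_spec (num : Int) (res : List Int) (i : Int)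
    (h1 : 1 ≤ num - pySum res) (h2 : num - pySum res ≤ i - 1) :
    innerA num res i = res ++ [num - pySum res] := by
  obtain ⟨m, hm⟩ : ∃ m : Nat, i - 1 = (m : Int) := ⟨(i - 1).toNat, by omega⟩
  unfold innerA
  rw [hm]
  exact inner_hit num m res h1 (by omega)

theorem tri_le (a b : Int) (h0 : 0 ≤ a) (h : a ≤ b) : a * (a + 1) ≤ b * (b + 1) := by
  nlinarith

theorem loopA_spec (num t k : Int) (hk : 1 ≤ k) (ht : 2 * t = k * (k + 1))
    (h1 : t ≤ num) (h2 : num < t + k + 1) :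
    ∀ (fuel : Nat) (i : Int), 2 ≤ i → i ≤ k + 1 → (k + 2 - i).toNat < fuel →
      loopA num fuel (PySem.List.pyRange 1 i 1) i
        = PySem.List.pyRange 1 (k + 1) 1 ++ (if num = t then [] else [num - t]) := by
  intro fuel
  induction fuel with
  | zero => intro i _ _ hf; omega
  | succ f ih =>
    intro i hi2 hik hf
    have hs := pySum_pyRange' i (by omega)
    set s := pySum (PySem.List.pyRange 1 i 1) with hsdef
    unfold loopA
    by_cases hsn : s = num
    · -- loop exits: i = k+1 and num = t
      rw [if_neg (by rw [← hsdef]; omega)]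
      have hik' : i = k + 1 := by
        by_contra hne
        have hle : i - 1 ≤ k - 1 := by omega
        nlinarith [tri_le (i - 1) (k - 1) (by omega) hle]
      have hnt : num = t := by
        rw [hik'] at hs; ring_nf at hs ht; linarith
      rw [hik', if_pos hnt, List.append_nil]
    · have hsle : s ≤ num := by nlinarith [tri_le (i - 1) k (by omega) (by omega)]
      have hslt : s < num := by omega
      rw [if_pos (by rw [← hsdef]; omega)]
      by_cases hbig : s + i > num
      · -- final step: i = k+1, append r = num - t, then exit
        have hik' : i = k + 1 := by
          by_contra hne
          have hle : i ≤ k := by omega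
          nlinarith [tri_le i k (by omega) hle]
        have hst : s = t := by
          rw [hik'] at hs; ring_nf at hs ht; linarith
        rw [if_pos hbig]
        rw [innerA_spec num _ i (by omega) (by omega)]
        rw [← hsdef, hst]
        have hf1 : ∃ f', f = f' + 1 := ⟨f - 1, by omega⟩
        obtain ⟨f', rfl⟩ := hf1
        unfold loopA
        have hsum : pySum (PySem.List.pyRange 1 i 1 ++ [num - t]) = num := by
          rw [pySum_append, ← hsdef, hst]; ring
        rw [if_neg (by simp [hsum])]
        rw [hik', if_neg (by omega)]
      · -- append i, continue
        rw [if_neg (by rw [← hsdef]; exact hbig)]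
        have hik'' : i ≤ k := by
          by_contra hne
          have hi : i = k + 1 := by omega
          have hsile : s + i ≤ num := by omega
          rw [hi] at hs hsile
          ring_nf at hs ht
          linarith
        have happ : PySem.List.pyRange 1 i 1 ++ [i] = PySem.List.pyRange 1 (i + 1) 1 :=
          (PySem.List.pyRange_one_succ_right (by omega)).symm
        rw [happ]
        exact ih (i + 1) (by omega) (by omega) (by omega)

theorem loopB_spec (num : Int) :
    ∀ (fuel : Nat) (total k : Int), 0 ≤ k → 2 * total = k * (k + 1) → total ≤ num →
      (num - total).toNat < fuel →
      let p := loopB num fuel total k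
      0 ≤ p.2 ∧ 2 * p.1 = p.2 * (p.2 + 1) ∧ p.1 ≤ num ∧ num < p.1 + p.2 + 1 := by
  intro fuel
  induction fuel with
  | zero => intro total k _ _ _ hf; omega
  | succ f ih =>
    intro total k hk ht h1 hf
    unfold loopB
    by_cases hc : total + k + 1 ≤ num
    · rw [if_pos hc]
      exact ih (total + (k + 1)) (k + 1) (by omega) (by ring_nf; ring_nf at ht; omega)
        (by omega) (by omega)
    · rw [if_neg hc]
      exact ⟨hk, ht, h1, by omega⟩

-- two descending (≥-sorted) rearrangements of the same Int multiset are equal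
-- two descending (≥-sorted) rearrangements of the same Int multiset are equal
theorem sorted_rev_eq (xs ys : List Int) (hp : ys.Perm xs)
    (hs : ys.Pairwise (fun a b => b ≤ a)) :
    PySem.List.sorted xs (fun x => x) true = ys :=
  List.Perm.eq_of_pairwise (fun _ _ _ _ h1 h2 => le_antisymm h2 h1)
    (PySem.List.sorted_pairwise_rev xs (fun x => x)) hs
    ((PySem.List.sorted_perm xs (fun x => x) true).trans hp.symm)

theorem desc_pairwise (a b : Int) :
    (PySem.List.pyRange a b (-1)).Pairwise (fun x y => y ≤ x) := by
  rw [PySem.List.pyRange_neg_one_eq_reverse]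
  rw [List.pairwise_reverse]
  exact (PySem.List.pairwise_lt_pyRange_one (b + 1) (a + 1)).imp (fun h => le_of_lt h)

theorem desc_append (k r : Int) (h1 : 0 ≤ r) (h2 : r ≤ k) :
    PySem.List.pyRange k r (-1) ++ PySem.List.pyRange r 0 (-1)
      = PySem.List.pyRange k 0 (-1) := by
  rw [PySem.List.pyRange_neg_one_eq_reverse, PySem.List.pyRange_neg_one_eq_reverse,
    PySem.List.pyRange_neg_one_eq_reverse, ← List.reverse_append]
  rw [← PySem.List.pyRange_one_append (0 + 1) (r + 1) (k + 1) (by omega) (by omega)]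

theorem desc_perm_asc (k : Int) :
    (PySem.List.pyRange k 0 (-1)).Perm (PySem.List.pyRange 1 (k + 1) 1) := by
  rw [PySem.List.pyRange_neg_one_eq_reverse]
  exact (PySem.List.pyRange 1 (k + 1) 1).reverse_perm

-- the descending construction of B is sorted(asc ++ [r], reverse=True)
theorem sorted_case_r0 (k : Int) :
    PySem.List.sorted (PySem.List.pyRange 1 (k + 1) 1) (fun x => x) true
      = PySem.List.pyRange k 0 (-1) :=
  sorted_rev_eq _ _ (desc_perm_asc k) (desc_pairwise k 0)

theorem sorted_case_r (k r : Int) (h1 : 1 ≤ r) (h2 : r ≤ k) :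
    PySem.List.sorted (PySem.List.pyRange 1 (k + 1) 1 ++ [r]) (fun x => x) true
      = PySem.List.pyRange k r (-1) ++ r :: PySem.List.pyRange r 0 (-1) := by
  apply sorted_rev_eq
  · -- permutation
    have hmid : (PySem.List.pyRange k r (-1) ++ r :: PySem.List.pyRange r 0 (-1)).Perm
        (r :: (PySem.List.pyRange k r (-1) ++ PySem.List.pyRange r 0 (-1))) :=
      List.perm_middle
    rw [desc_append k r (by omega) h2] at hmid
    refine hmid.trans ?_
    refine ((desc_perm_asc k).cons r).trans ?_
    have : (PySem.List.pyRange 1 (k + 1) 1 ++ [r]).Perm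
        (r :: PySem.List.pyRange 1 (k + 1) 1) := by
      simpa using (List.perm_middle (a := r) (l₁ := PySem.List.pyRange 1 (k + 1) 1)
        (l₂ := ([] : List Int)))
    exact this.symm
  · -- pairwise ≥
    rw [List.pairwise_append]
    refine ⟨desc_pairwise k r, ?_, ?_⟩
    · rw [List.pairwise_cons]
      refine ⟨?_, desc_pairwise r 0⟩
      intro x hx
      rw [PySem.List.mem_pyRange_neg_one] at hx
      omega
    · intro x hx y hy
      rw [PySem.List.mem_pyRange_neg_one] at hx
      rcases List.mem_cons.mp hy with rfl | hy'
      · omega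
      · rw [PySem.List.mem_pyRange_neg_one] at hy'
        omega

-- ===== VERDICT (by name: the statement is the Claim_ definition above) =====
theorem get_sequence_list_spec : Claim_equal_get_sequence_list := by
  intro num _ hpre
  unfold Spec_get_sequence_list get_sequence_list get_sequence_list_alt
  by_cases h0 : num = 0
  · rw [if_pos h0, if_pos h0]
  · rw [if_neg h0, if_neg h0]
    have hnum : 1 ≤ num := by
      unfold Pre_get_sequence_list at hpre; omega
    have hB := loopB_spec num (num.toNat + 1) 0 0 (by omega) (by ring) (by omega) (by omega)
    set p := loopB num (num.toNat + 1) 0 0 with hp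
    obtain ⟨hk0, ht, h1, h2⟩ := hB
    have hk1 : 1 ≤ p.2 := by
      by_contra h
      have h20 : p.2 = 0 := by omega
      rw [h20] at ht h2
      norm_num at ht
      omega
    have hkn : p.2 ≤ num := by
      nlinarith [mul_nonneg (show (0:Int) ≤ p.2 by omega) (show (0:Int) ≤ p.2 - 1 by omega)]
    have hA := loopA_spec num p.1 p.2 hk1 ht h1 h2 (num.toNat + 2) 2 (by omega) (by omega)
      (by omega)
    have h12 : PySem.List.pyRange 1 2 1 = [1] := by decide
    rw [h12] at hA
    rw [hA]
    by_cases hr : num - p.1 = 0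
    · rw [if_pos hr, if_pos (by omega), List.append_nil]
      exact sorted_case_r0 p.2
    · rw [if_neg hr, if_neg (by omega)]
      exact sorted_case_r p.2 (num - p.1) (by omega) (by omega)
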